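-- pv_equiv track=rewrite | github.com/malikuzair22/AI-ML-DevelopersHub-Internship | Health_Query_Chatbot_Task4/health_chatbot.py | safety_filter
-- ===== SOURCE A (Python) =====
-- def safety_filter(query):
--     dangerous_keywords = [
--         "suicide", "kill myself", "overdose",
--         "self harm", "how to die", "end my life"
--     ]
--     for keyword in dangerous_keywords:
--         if keyword.lower() in query.lower():
--             return True
--     return False
-- ===== SOURCE B (Python) =====
-- def safety_filter(query):
--     dangerous_keywords = [
--         "suicide", "kill myself", "overdose",
--         "self harm", "how to die", "end my life"
--     ]
--     q = query.lower()
--     return any(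
--         any(q.startswith(k, i) for k in dangerous_keywords)
--         for i in range(len(q) + 1)
--     )
-- ===== Notes on version B (the rewrite author's own statement) =====
-- stated objective: alternative
-- what changed: B lowercases the query once and makes a single left-to-right scan over the query positions, testing at each position whether any keyword starts there, instead of A's outer loop over keywords with a fresh full substring search (and a fresh query.lower()) per keyword.
import Mathlib
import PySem

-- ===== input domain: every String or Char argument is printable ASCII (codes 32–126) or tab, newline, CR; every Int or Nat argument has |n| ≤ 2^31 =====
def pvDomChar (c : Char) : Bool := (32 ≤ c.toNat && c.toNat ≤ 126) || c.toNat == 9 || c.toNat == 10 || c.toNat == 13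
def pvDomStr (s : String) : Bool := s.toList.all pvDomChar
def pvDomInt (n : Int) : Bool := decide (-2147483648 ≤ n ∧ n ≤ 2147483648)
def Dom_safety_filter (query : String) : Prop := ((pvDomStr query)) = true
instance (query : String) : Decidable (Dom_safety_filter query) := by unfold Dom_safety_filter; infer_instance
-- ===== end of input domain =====

-- B lowercases the query once and scans its positions left-to-right, testing whether any keyword
-- starts at each position, instead of A's per-keyword full substring searches; objective: alternative.


-- ===== PORT A =====
-- A: loop over the keyword list; return True on the first keyword with keyword.lower() in query.lower().
def safety_filter (query : String) : Bool :=
  let dangerous_keywords : List String :=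
    ["suicide", "kill myself", "overdose", "self harm", "how to die", "end my life"]
  dangerous_keywords.any (fun keyword =>
    PySem.Str.isIn (PySem.Str.lower keyword) (PySem.Str.lower query))

-- ===== PORT B =====
-- B helper: 'any(q.startswith(k, i) for k in ks) for i in range(len(q)+1)' — the loop over the
-- positions i is transcribed as structural recursion over the successive suffixes of q.
def pvScanB (ks : List (List Char)) (q : List Char) : Bool :=
  ks.any (fun k => PySem.Chars.startswith q k) ||
    match q with
    | [] => false
    | _ :: t => pvScanB ks t

def safety_filter_alt (query : String) : Bool :=
  let dangerous_keywords : List (List Char) :=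
    ["suicide", "kill myself", "overdose", "self harm", "how to die", "end my life"].map String.toList
  pvScanB dangerous_keywords (PySem.Chars.lower query.toList)

-- ===== PRECONDITION & SPEC =====
def Spec_safety_filter (query : String) (out : Bool) : Prop := out = safety_filter_alt query
instance (query : String) (out : Bool) : Decidable (Spec_safety_filter query out) := by unfold Spec_safety_filter; infer_instance

-- ===== CLAIM (what is proved, stated in full; the proofs are below) =====
def Claim_equal_safety_filter : Prop := ∀ (query : String), Dom_safety_filter query → Spec_safety_filter query (safety_filter query)

-- ===== LEMMAS AND PROOFS =====

-- B's position scan finds exactly the keywords occurring as an infix of q.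
theorem pvScanB_true_iff (ks : List (List Char)) (q : List Char) :
    pvScanB ks q = true ↔ ∃ k ∈ ks, k <:+: q := by
  induction q with
  | nil =>
      simp [pvScanB, PySem.Chars.startswith_iff]
  | cons h t ih =>
      simp [pvScanB, PySem.Chars.startswith_iff, ih, List.infix_cons_iff]
      constructor
      · rintro (⟨k, hk, hp⟩ | ⟨k, hk, hi⟩) <;> exact ⟨k, hk, by tauto⟩
      · rintro ⟨k, hk, hp | hi⟩
        · exact Or.inl ⟨k, hk, hp⟩
        · exact Or.inr ⟨k, hk, hi⟩

-- the six keywords are already lowercase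
theorem pv_lower_keywords :
    PySem.Str.lower "suicide" = "suicide" ∧ PySem.Str.lower "kill myself" = "kill myself" ∧
    PySem.Str.lower "overdose" = "overdose" ∧ PySem.Str.lower "self harm" = "self harm" ∧
    PySem.Str.lower "how to die" = "how to die" ∧ PySem.Str.lower "end my life" = "end my life" := by
  decide

-- ===== VERDICT (by name: the statement is the Claim_ definition above) =====
theorem safety_filter_spec : Claim_equal_safety_filter := by
  intro query _
  show safety_filter query = safety_filter_alt query
  obtain ⟨h1, h2, h3, h4, h5, h6⟩ := pv_lower_keywords
  rw [Bool.eq_iff_iff]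
  simp only [safety_filter, safety_filter_alt, List.any_cons, List.any_nil, List.map,
    h1, h2, h3, h4, h5, h6, Bool.or_eq_true, PySem.Str.isIn_iff_infix, PySem.Str.toList_lower,
    pvScanB_true_iff]
  simp
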